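-- pv_equiv track=rewrite | github.com/Dylanlafranky/ARA-GIT | archive/numbered_tests/243BL14_gravitational_lens.py | compute_number_gaps
-- ===== SOURCE A (Python) =====
-- def compute_number_gaps(draws_list, number):
--     """Get the gap sequence for a specific number (draws between appearances)."""
--     gaps = []
--     last_seen = None
--     # draws are reverse chronological, so iterate backwards for forward time
--     for i in range(len(draws_list) - 1, -1, -1):
--         if number in draws_list[i]:
--             if last_seen is not None:
--                 gaps.append(last_seen - i)  # gap in draws
--             last_seen = i
--     return gaps
-- ===== SOURCE B (Python) =====
-- def compute_number_gaps(draws_list, number):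
--     """Get the gap sequence for a specific number (draws between appearances)."""
--     positions = [i for i in range(len(draws_list) - 1, -1, -1) if number in draws_list[i]]
--     return [a - b for a, b in zip(positions, positions[1:])]
-- ===== Notes on version B (the rewrite author's own statement) =====
-- stated objective: simpler
-- what changed: Replaced the single stateful loop with a last_seen accumulator by two stateless passes: first materialize the descending list of indices where the number appears, then take adjacent differences via zip.
import Mathlib
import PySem

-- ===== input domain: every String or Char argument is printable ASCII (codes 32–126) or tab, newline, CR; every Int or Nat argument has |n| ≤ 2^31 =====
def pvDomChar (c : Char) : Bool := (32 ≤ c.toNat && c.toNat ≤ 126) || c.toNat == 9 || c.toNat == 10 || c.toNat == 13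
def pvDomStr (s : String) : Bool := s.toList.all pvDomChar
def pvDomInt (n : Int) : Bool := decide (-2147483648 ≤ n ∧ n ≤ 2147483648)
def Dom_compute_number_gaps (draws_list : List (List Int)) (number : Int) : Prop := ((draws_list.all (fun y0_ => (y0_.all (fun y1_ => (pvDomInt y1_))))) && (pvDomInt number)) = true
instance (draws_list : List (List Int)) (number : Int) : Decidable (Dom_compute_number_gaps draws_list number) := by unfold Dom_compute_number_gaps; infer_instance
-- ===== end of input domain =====

-- B replaces A's stateful last_seen loop by two stateless passes (collect positions, then adjacent differences); objective: simpler.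

-- ===== PORT A =====
-- A's loop over range(len-1, -1, -1) with state (gaps, last_seen); draws_list[i] is
-- always in range here, so pyGetD with default [] is exact.
def compute_number_gaps (draws_list : List (List Int)) (number : Int) : List Int :=
  ((PySem.List.pyRange ((draws_list.length : Int) - 1) (-1) (-1)).foldl
    (fun (st : List Int × Option Int) (i : Int) =>
      if number ∈ PySem.List.pyGetD draws_list i [] then
        ((match st.2 with
          | some last_seen => st.1 ++ [last_seen - i]
          | none => st.1), some i)
      else st)
    ([], none)).1

-- ===== PORT B =====
-- B's two passes: the descending position list, then zip of adjacent pairs.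
def compute_number_gaps_alt (draws_list : List (List Int)) (number : Int) : List Int :=
  let positions := (PySem.List.pyRange ((draws_list.length : Int) - 1) (-1) (-1)).filter
    (fun i => decide (number ∈ PySem.List.pyGetD draws_list i []))
  List.zipWith (· - ·) positions positions.tail

-- ===== PRECONDITION & SPEC =====
def Spec_compute_number_gaps (draws_list : List (List Int)) (number : Int) (out : List Int) : Prop := out = compute_number_gaps_alt draws_list number
instance (draws_list : List (List Int)) (number : Int) (out : List Int) : Decidable (Spec_compute_number_gaps draws_list number out) := by unfold Spec_compute_number_gaps; infer_instance

-- ===== CLAIM (what is proved, stated in full; the proofs are below) =====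
def Claim_equal_compute_number_gaps : Prop := ∀ (draws_list : List (List Int)) (number : Int), Dom_compute_number_gaps draws_list number → Spec_compute_number_gaps draws_list number (compute_number_gaps draws_list number)

-- ===== LEMMAS AND PROOFS =====

-- gaps produced by A's accumulator, as a function of the filtered position list
def pvGapsAux (last : Option Int) : List Int → List Int
  | [] => []
  | x :: xs =>
    match last with
    | some l => (l - x) :: pvGapsAux (some x) xs
    | none => pvGapsAux (some x) xs

theorem pvFoldl_eq_gapsAux (dl : List (List Int)) (n : Int) (l : List Int)
    (g : List Int) (last : Option Int) :
    (l.foldl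
      (fun (st : List Int × Option Int) (i : Int) =>
        if n ∈ PySem.List.pyGetD dl i [] then
          ((match st.2 with
            | some last_seen => st.1 ++ [last_seen - i]
            | none => st.1), some i)
        else st)
      (g, last)).1
    = g ++ pvGapsAux last (l.filter (fun i => decide (n ∈ PySem.List.pyGetD dl i []))) := by
  induction l generalizing g last with
  | nil => simp [pvGapsAux]
  | cons x xs ih =>
    simp only [List.foldl_cons, List.filter_cons]
    by_cases h : n ∈ PySem.List.pyGetD dl x []
    · cases last with
      | some l => simp [h, ih, pvGapsAux]
      | none => simp [h, ih, pvGapsAux]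
    · simp [h, ih]

theorem pvGapsAux_some (a : Int) (xs : List Int) :
    pvGapsAux (some a) xs = List.zipWith (· - ·) (a :: xs) xs := by
  induction xs generalizing a with
  | nil => simp [pvGapsAux]
  | cons b bs ih => simp [pvGapsAux, ih]

-- ===== VERDICT (by name: the statement is the Claim_ definition above) =====
theorem compute_number_gaps_spec : Claim_equal_compute_number_gaps := by
  intro dl n _
  unfold Spec_compute_number_gaps compute_number_gaps compute_number_gaps_alt
  rw [pvFoldl_eq_gapsAux]
  cases h : (PySem.List.pyRange ((dl.length : Int) - 1) (-1) (-1)).filter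
      (fun i => decide (n ∈ PySem.List.pyGetD dl i [])) with
  | nil => simp [pvGapsAux]
  | cons a xs => simp [pvGapsAux, pvGapsAux_some]
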